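-- pv_equiv track=rewrite | github.com/mextier/PyStepikC431 | step7a.py | genseq
-- ===== SOURCE A (Python) =====
-- def genseq(data):
--     n = ""
--     for i in data:
--         if i.isdigit():
--             n = n + str(i)
--         else:
--             if not len(n):
--                 n="1"
--             yield (int(n),i)
--             n=""
-- ===== SOURCE B (Python) =====
-- def genseq(data):
--     # Index-based span scanner: advance j over each maximal digit run, then emit
--     # (int of the run, or 1 if empty, delimiter char); no growing accumulator string.
--     i, n = 0, len(data)
--     while i < n:
--         j = i
--         while j < n and data[j].isdigit():
--             j += 1
--         if j == n:
--             return
--         yield (int(data[i:j]) if j > i else 1, data[j])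
--         i = j + 1
-- ===== Notes on version B (the rewrite author's own statement) =====
-- stated objective: alternative
-- what changed: Replaced the stateful character-accumulator loop (building the count string one digit at a time) by an index-based span scanner that advances over each maximal digit run and converts the slice at once.
import Mathlib
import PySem

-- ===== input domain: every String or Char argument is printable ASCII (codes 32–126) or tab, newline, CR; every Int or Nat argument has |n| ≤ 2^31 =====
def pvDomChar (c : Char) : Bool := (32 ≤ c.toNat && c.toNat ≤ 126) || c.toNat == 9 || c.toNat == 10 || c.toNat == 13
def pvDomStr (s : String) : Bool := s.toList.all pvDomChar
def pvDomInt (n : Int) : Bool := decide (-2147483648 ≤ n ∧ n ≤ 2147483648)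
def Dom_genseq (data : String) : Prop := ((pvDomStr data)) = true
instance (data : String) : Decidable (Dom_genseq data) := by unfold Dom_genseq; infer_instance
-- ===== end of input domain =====

-- B replaces A's stateful digit-accumulator loop by a span scanner over maximal digit runs (objective: alternative decomposition; same results).

-- ===== PORT A =====
-- state n : List Char is Python's accumulator string; int(n) is only reached with n a
-- nonempty digit string (or "1"), where ofChars? is some, so `.getD 0` is never exercised.
def genseqLoopA : List Char → List Char → List (Int × String)
  | [], _ => []
  | c :: rest, n =>
    if PySem.Chars.isdigit c then
      genseqLoopA rest (n ++ [c])
    else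
      let n' := if n.length = 0 then ['1'] else n
      ((PySem.Int.ofChars? n').getD 0, String.mk [c]) :: genseqLoopA rest []

def genseq (data : String) : List (Int × String) := genseqLoopA data.toList []

-- ===== PORT B =====
-- Source B's inner `while j < n and data[j].isdigit(): j += 1` is the takeWhile/dropWhile span;
-- data[i:j] is ds; the outer loop is the structural recursion on the remainder after data[j].
def genseqSpan (cs : List Char) : List (Int × String) :=
  let ds := cs.takeWhile PySem.Chars.isdigit
  match h : cs.dropWhile PySem.Chars.isdigit with
  | [] => []
  | c :: tl =>
    ((if ds = [] then 1 else (PySem.Int.ofChars? ds).getD 0), String.mk [c]) :: genseqSpan tl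
termination_by cs.length
decreasing_by
  have hle := List.length_dropWhile_le (p := PySem.Chars.isdigit) (l := cs)
  rw [h] at hle
  simp at hle
  omega

def genseq_alt (data : String) : List (Int × String) := genseqSpan data.toList

-- ===== PRECONDITION & SPEC =====
def Spec_genseq (data : String) (out : List (Int × String)) : Prop := out = genseq_alt data
instance (data : String) (out : List (Int × String)) : Decidable (Spec_genseq data out) := by unfold Spec_genseq; infer_instance

-- ===== CLAIM (what is proved, stated in full; the proofs are below) =====
def Claim_equal_genseq : Prop := ∀ (data : String), Dom_genseq data → Spec_genseq data (genseq data)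

-- ===== LEMMAS AND PROOFS =====

-- A's loop with pending accumulator n, characterised by the span of its input.
theorem loopA_span (cs : List Char) : ∀ n : List Char, genseqLoopA cs n =
    match cs.dropWhile PySem.Chars.isdigit with
    | [] => []
    | c :: tl =>
      (((PySem.Int.ofChars? (if (n ++ cs.takeWhile PySem.Chars.isdigit).length = 0
          then ['1'] else n ++ cs.takeWhile PySem.Chars.isdigit)).getD 0),
        String.mk [c]) :: genseqLoopA tl [] := by
  induction cs with
  | nil => intro n; simp [genseqLoopA]
  | cons c rest ih =>
    intro n
    by_cases hd : PySem.Chars.isdigit c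
    · simp only [genseqLoopA, hd, if_true, List.takeWhile_cons_of_pos, List.dropWhile_cons_of_pos,
        hd, ih (n ++ [c]), List.append_assoc, List.cons_append, List.nil_append]
    · simp [genseqLoopA, hd, List.takeWhile_cons_of_neg, List.dropWhile_cons_of_neg]

theorem span_nil (cs : List Char) (h : List.dropWhile PySem.Chars.isdigit cs = []) :
    genseqSpan cs = [] := by
  rw [genseqSpan]
  split <;> simp_all

theorem span_cons (cs : List Char) (c : Char) (tl : List Char)
    (h : List.dropWhile PySem.Chars.isdigit cs = c :: tl) :
    genseqSpan cs = ((if cs.takeWhile PySem.Chars.isdigit = [] then 1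
        else (PySem.Int.ofChars? (cs.takeWhile PySem.Chars.isdigit)).getD 0),
      String.mk [c]) :: genseqSpan tl := by
  rw [genseqSpan]
  split <;> simp_all

theorem span_eq_loopA (cs : List Char) : genseqSpan cs = genseqLoopA cs [] := by
  induction cs using genseqSpan.induct with
  | case1 cs h =>
    rw [span_nil cs h, loopA_span cs []]
    simp only [h]
  | case2 cs c tl h ih =>
    rw [span_cons cs c tl h, loopA_span cs []]
    simp only [h, List.nil_append, ih]
    congr 2
    by_cases he : cs.takeWhile PySem.Chars.isdigit = []
    · simp only [he, List.length_nil, if_pos]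
      decide
    · simp [he, List.length_eq_zero_iff]

-- ===== VERDICT (by name: the statement is the Claim_ definition above) =====
theorem genseq_spec : Claim_equal_genseq := by
  intro data _
  unfold Spec_genseq genseq genseq_alt
  exact (span_eq_loopA _).symm
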